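-- pv_equiv track=rewrite | github.com/agl-alexglopez/heap-allocator-workshop | pysrc/parsing.py | get_heap_address
-- ===== SOURCE A (Python) =====
-- def get_heap_address(line):
--     """
--     Given a line of text, determines the hexadecimal address of the heap request. However, we will
--     just take the number as a unique integer to put into our map, base 10.
--     >>> get_heap_address('gcc->malloc(48)=0x18102a0')
--     25232032
--     >>> get_heap_address('gcc->free(0x1836e50)=<void>')
--     25390672
--     >>> get_heap_address('gcc-g3-O0-std=gnu99-Wall$warnflagstriangle.c-otriangle')
--     >>> get_heap_address('+++exited(status0)+++')
--     >>> get_heap_address('---SIGCHLD(Childexited)---')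
--     >>> get_heap_address('nvim->free(0x22e8f10<noreturn...>')
--     36605712
--     """
--     # The arrow prepends any malloc, calloc, realloc, or free.
--     call_index = line.find('->')
--     if call_index == -1:
--         return None
--     open_paren = line.find('(', call_index)
--     # Some edgecase errors can interrupt a normal free line, so find free id by name rather than = sign.
--     if line[call_index + 2:open_paren] == 'free':
--         i = open_paren + 1
--         while i < len(line) and line[i].isalnum():
--             i += 1
--         try:
--             return int(line[open_paren + 1: i], 16)
--         except ValueError:
--             return None
--     # Now we have a more simple search because we know ID is on the right side of equals sign.
--     equals = line.find('=', call_index)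
--     second_half = line[equals + 1:]
--     try:
--         return int(second_half, 16)
--     except ValueError:
--         return None
-- ===== SOURCE B (Python) =====
-- def _hex_or_none(token):
--     try:
--         return int(token, 16)
--     except ValueError:
--         return None
--
--
-- def get_heap_address(line):
--     # One forward pass: a small state machine that simultaneously finds the
--     # '->' arrow, collects the callee name up to the first '(', the
--     # alphanumeric run right after that '(', and the text after the first '='.
--     arrow = False
--     prev = None
--     paren_seen = False
--     name = []
--     run_open = False
--     run = []
--     eq_seen = False
--     tail = []
--     for ch in line:
--         if not arrow:
--             if prev == '-' and ch == '>':
--                 arrow = True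
--             prev = ch
--         else:
--             if eq_seen:
--                 tail.append(ch)
--             elif ch == '=':
--                 eq_seen = True
--             if run_open:
--                 if ch.isalnum():
--                     run.append(ch)
--                 else:
--                     run_open = False
--             elif not paren_seen:
--                 if ch == '(':
--                     paren_seen = True
--                     run_open = True
--                 else:
--                     name.append(ch)
--     if not arrow:
--         return None
--     if paren_seen and name == ['f', 'r', 'e', 'e']:
--         return _hex_or_none(''.join(run))
--     if not eq_seen:
--         return None
--     return _hex_or_none(''.join(tail))
-- ===== Notes on version B (the rewrite author's own statement) =====
-- stated objective: alternative
-- what changed: Replaces A's staged find/slice passes (find '->', find '(', compare a slice, an index while-loop, find '=', slice) by a single forward character pass: a finite-state machine that in one traversal finds the arrow and accumulates the callee name, the alphanumeric run after '(' and the text after the first '=', deciding at the end.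
-- intended difference: On lines whose text after the first '->' is 'free' plus exactly one extra non-'(' character and whose leading alphanumeric run is a valid base-16 numeral, A's open_paren=-1 fallthrough slices off the last character, wrongly enters the free branch and returns the hex value of the LINE'S leading alphanumeric run (e.g. 10 for 'a->freex'), while B returns None, the intended result since no call argument is present. — e.g. on get_heap_address("a->freex"): A returns some 10, B returns none
import Mathlib
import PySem

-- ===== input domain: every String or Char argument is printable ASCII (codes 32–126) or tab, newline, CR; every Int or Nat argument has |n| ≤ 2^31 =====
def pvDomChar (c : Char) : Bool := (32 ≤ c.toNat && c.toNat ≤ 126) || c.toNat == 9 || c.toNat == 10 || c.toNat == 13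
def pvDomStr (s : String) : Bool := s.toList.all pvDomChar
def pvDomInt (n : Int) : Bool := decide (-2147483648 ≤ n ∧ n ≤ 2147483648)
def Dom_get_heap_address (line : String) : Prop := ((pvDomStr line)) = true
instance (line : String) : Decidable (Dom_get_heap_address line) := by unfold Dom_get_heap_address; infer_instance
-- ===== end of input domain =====

-- B replaces A's staged find/slice passes by one forward character pass (a finite-state machine
-- collecting name, post-'(' run and post-'=' tail at once); objective: alternative, same cost.

-- ===== PORT A =====
-- int(s, 16), hand-ported step for step (exact: CPython's whitespace stripping, one optional sign,
-- optional 0x/0X prefix, single '_' separators between digits, hex digits).  PySem.Int.ofStrBase?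
-- computes the same values, but its recursive core is private to the prelude, so the parser is
-- written out here (shared by both ports exactly as both Pythons share int(·, 16)).
def pvHexDigitOk (c : Char) : Bool := decide ((PySem.Int.digitVal? c).getD 16 < 16)

def pvHexGo : List Char → Bool → Nat → Option Nat
  | [], afterDigit, acc => if afterDigit then some acc else none
  | c :: rest, afterDigit, acc =>
    if pvHexDigitOk c then pvHexGo rest true (acc * 16 + (PySem.Int.digitVal? c).getD 0)
    else if c = '_' ∧ afterDigit then
      (match rest with
       | d :: _ => if pvHexDigitOk d then pvHexGo rest false acc else none
       | [] => none)
    else none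

def pvHexDigits? : List Char → Option Nat
  | [] => none
  | cs => pvHexGo cs false 0

def pvStrip (l : List Char) : List Char :=
  (List.dropWhile PySem.Int.isIntSpace (List.dropWhile PySem.Int.isIntSpace l).reverse).reverse

def pvSign : List Char → Bool × List Char
  | '-' :: r => (true, r)
  | '+' :: r => (false, r)
  | r => (false, r)

def pvUsePfx : List Char → Bool
  | '0' :: c :: _ => c = 'x' || c = 'X'
  | _ => false

def pvDropPfx (cs : List Char) : List Char :=
  match cs.drop 2 with
  | '_' :: d :: r => if pvHexDigitOk d then d :: r else '_' :: d :: r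
  | r => r

def pvInt16? (s : List Char) : Option Int :=
  match pvSign (pvStrip s) with
  | (neg, cs) =>
    let ds := if pvUsePfx cs then pvDropPfx cs else cs
    match pvHexDigits? ds with
    | none => none
    | some n => some (if neg then -(n : Int) else (n : Int))

-- the `while i < len(line) and line[i].isalnum(): i += 1` loop; i = open_paren+1 ≥ 0, so a Nat
-- counter is exact; the fuel l.length - i only bounds the loop, l[i]? = none is Python's i < len(line) test
def pvScanAGo (l : List Char) : Nat → Nat → Nat
  | 0, i => i
  | fuel + 1, i =>
    match l[i]? with
    | some c => if PySem.Chars.isalnum c then pvScanAGo l fuel (i + 1) else i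
    | none => i

def pvScanA (l : List Char) (i : Nat) : Nat := pvScanAGo l (l.length - i) i

def get_heap_address (line : String) : Option Int :=
  let call_index := PySem.Str.find line "->"
  if call_index == -1 then none
  else
    let open_paren := PySem.Str.findFrom line "(" call_index
    if PySem.Str.slice line (some (call_index + 2)) (some open_paren) == "free" then
      let i := pvScanA line.toList (open_paren + 1).toNat
      pvInt16? (PySem.Str.slice line (some (open_paren + 1)) (some (i : Int))).toList
    else
      let equals := PySem.Str.findFrom line "=" call_index
      let second_half := PySem.Str.slice line (some (equals + 1)) none
      pvInt16? second_half.toList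

-- ===== PORT B =====
-- the loop state of B's single pass (Python's eight local variables; prev = None ↦ none)
structure PvSt where
  arrow : Bool
  prev : Option Char
  parenSeen : Bool
  name : List Char
  runOpen : Bool
  run : List Char
  eqSeen : Bool
  tail : List Char
deriving DecidableEq, Repr

def pvInit : PvSt := ⟨false, none, false, [], false, [], false, []⟩

-- B's loop body, branch for branch
def pvStep (st : PvSt) (ch : Char) : PvSt :=
  if st.arrow = false then
    let st' := if st.prev = some '-' ∧ ch = '>' then { st with arrow := true } else st
    { st' with prev := some ch }
  else
    let st' := if st.eqSeen then { st with tail := st.tail ++ [ch] }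
               else if ch = '=' then { st with eqSeen := true }
               else st
    if st'.runOpen then
      if PySem.Chars.isalnum ch then { st' with run := st'.run ++ [ch] }
      else { st' with runOpen := false }
    else if st'.parenSeen = false then
      if ch = '(' then { st' with parenSeen := true, runOpen := true }
      else { st' with name := st'.name ++ [ch] }
    else st'

def get_heap_address_alt (line : String) : Option Int :=
  let st := line.toList.foldl pvStep pvInit
  if st.arrow = false then none
  else if st.parenSeen = true ∧ st.name = ['f', 'r', 'e', 'e'] then pvInt16? st.run
  else if st.eqSeen = false then none
  else pvInt16? st.tail

-- ===== PRECONDITION & SPEC =====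
-- On lines whose text after the first '->' is 'free' plus exactly one extra non-'(' character and whose
-- leading alphanumeric run is a valid base-16 numeral, A's open_paren=-1 fallthrough slices off the last
-- character, wrongly enters the free branch and returns the hex value of the LINE'S leading alphanumeric
-- run (e.g. 10 for 'a->freex'), while B returns None, the intended result (no call argument is present).
def D_get_heap_address (line : String) : Prop :=
  let l := line.toList
  let k := PySem.Chars.find l ['-', '>']
  k ≠ -1 ∧
  PySem.Chars.isIn ['('] (l.drop (k.toNat + 2)) = false ∧
  (l.drop (k.toNat + 2)).dropLast = ['f', 'r', 'e', 'e'] ∧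
  (let run := l.takeWhile PySem.Chars.isalnum
   let ds := if run.take 2 = ['0', 'x'] ∨ run.take 2 = ['0', 'X'] then run.drop 2 else run
   ds ≠ [] ∧ ds.all (fun c => (PySem.Int.digitVal? c).getD 16 < 16) = true)
instance (line : String) : Decidable (D_get_heap_address line) := by unfold D_get_heap_address; infer_instance

def Spec_get_heap_address (line : String) (out : Option Int) : Prop := ¬ D_get_heap_address line → out = get_heap_address_alt line
instance (line : String) (out : Option Int) : Decidable (Spec_get_heap_address line out) := by unfold Spec_get_heap_address; infer_instance

def pvDiffWitness_get_heap_address : String := "a->freex"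
def pvDiffWitnessOut_get_heap_address : (Option Int) × (Option Int) := (some 10, none)

-- ===== CLAIM (what is proved, stated in full; the proofs are below) =====
def Claim_unchanged_get_heap_address : Prop := ∀ (line : String), Dom_get_heap_address line → Spec_get_heap_address line (get_heap_address line)
def Claim_changed_get_heap_address : Prop := Dom_get_heap_address (pvDiffWitness_get_heap_address) ∧ D_get_heap_address (pvDiffWitness_get_heap_address) ∧ get_heap_address (pvDiffWitness_get_heap_address) = pvDiffWitnessOut_get_heap_address.1 ∧ get_heap_address_alt (pvDiffWitness_get_heap_address) = pvDiffWitnessOut_get_heap_address.2 ∧ pvDiffWitnessOut_get_heap_address.1 ≠ pvDiffWitnessOut_get_heap_address.2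
def Claim_exact_get_heap_address : Prop := ∀ (line : String), Dom_get_heap_address line → D_get_heap_address line → get_heap_address line ≠ get_heap_address_alt line

-- ===== LEMMAS AND PROOFS =====

-- ---- hex-parser core facts ----
lemma pv_hexGo_cons (c : Char) (rest : List Char) (ad : Bool) (acc : Nat) :
    pvHexGo (c :: rest) ad acc =
      if pvHexDigitOk c = true then pvHexGo rest true (acc * 16 + (PySem.Int.digitVal? c).getD 0)
      else if c = '_' ∧ ad = true then
        (match rest with
         | d :: _ => if pvHexDigitOk d = true then pvHexGo rest false acc else none
         | [] => none)
      else none := rfl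

-- a character that is neither a hex digit nor '_' kills the digit scanner
lemma pv_hexGo_bad {bad : Char} (hb : pvHexDigitOk bad = false) (hu : bad ≠ '_') :
    ∀ {ds : List Char} (ad : Bool) (acc : Nat), bad ∈ ds → pvHexGo ds ad acc = none := by
  intro ds
  induction ds with
  | nil => intro ad acc h; cases h
  | cons c rest ih =>
    intro ad acc hm
    rw [pv_hexGo_cons]
    rcases List.mem_cons.mp hm with rfl | hmr
    · rw [if_neg (by rw [hb]; exact Bool.false_ne_true), if_neg (fun h => hu h.1)]
    · by_cases hc : pvHexDigitOk c = true
      · rw [if_pos hc]; exact ih true _ hmr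
      · rw [if_neg hc]
        by_cases h2 : c = '_' ∧ ad = true
        · rw [if_pos h2]
          cases rest with
          | nil => cases hmr
          | cons d tail =>
            show (if pvHexDigitOk d = true then pvHexGo (d :: tail) false acc else none) = none
            by_cases hd : pvHexDigitOk d = true
            · rw [if_pos hd]; exact ih false acc hmr
            · rw [if_neg hd]
        · rw [if_neg h2]

-- a nonempty all-hex-digit string parses
lemma pv_hexGo_good : ∀ {ds : List Char} (ad : Bool) (acc : Nat),
    (∀ c ∈ ds, pvHexDigitOk c = true) → (ds ≠ [] ∨ ad = true) → (pvHexGo ds ad acc).isSome = true := by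
  intro ds
  induction ds with
  | nil =>
    intro ad acc _ h
    rcases h with h | h
    · exact absurd rfl h
    · simp [pvHexGo, h]
  | cons c rest ih =>
    intro ad acc hall _
    have hc : pvHexDigitOk c = true := hall c (List.mem_cons_self ..)
    rw [pv_hexGo_cons, if_pos hc]
    refine ih true _ (fun d hd => hall d (List.mem_cons_of_mem _ hd)) ?_
    cases rest with
    | nil => exact Or.inr rfl
    | cons _ _ => exact Or.inl (by simp)

lemma pv_mem_dropWhile {c : Char} {p : Char → Bool} (hp : p c = false) :
    ∀ {l : List Char}, c ∈ l → c ∈ List.dropWhile p l := by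
  intro l
  induction l with
  | nil => intro h; cases h
  | cons a t ih =>
    intro h
    rw [List.dropWhile_cons]
    split
    · next ha =>
      rcases List.mem_cons.mp h with rfl | hm
      · rw [hp] at ha; cases ha
      · exact ih hm
    · exact h

lemma pv_mem_strip {c : Char} (hc : PySem.Int.isIntSpace c = false) {l : List Char}
    (h : c ∈ l) : c ∈ pvStrip l := by
  unfold pvStrip
  rw [List.mem_reverse]
  exact pv_mem_dropWhile hc (by rw [List.mem_reverse]; exact pv_mem_dropWhile hc h)

lemma pv_mem_sign {c : Char} (h1 : c ≠ '-') (h2 : c ≠ '+') {l : List Char} (h : c ∈ l) :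
    c ∈ (pvSign l).2 := by
  unfold pvSign
  split
  · next r =>
    rcases List.mem_cons.mp h with rfl | hm
    · exact absurd rfl h1
    · exact hm
  · next r =>
    rcases List.mem_cons.mp h with rfl | hm
    · exact absurd rfl h2
    · exact hm
  · exact h

lemma pv_hexDigits_bad {bad : Char} (hb : pvHexDigitOk bad = false) (hu : bad ≠ '_')
    {ds : List Char} (h : bad ∈ ds) : pvHexDigits? ds = none := by
  cases ds with
  | nil => cases h
  | cons a t => exact pv_hexGo_bad hb hu _ _ h

-- int(l, 16) fails whenever l contains '>' (in particular on any line containing "->")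
lemma pv_int16_gt {l : List Char} (h : '>' ∈ l) : pvInt16? l = none := by
  unfold pvInt16?
  have h2 : '>' ∈ (pvSign (pvStrip l)).2 :=
    pv_mem_sign (by decide) (by decide) (pv_mem_strip (by decide) h)
  rcases hsg : pvSign (pvStrip l) with ⟨neg, cs⟩
  rw [hsg] at h2
  simp only
  have hds : '>' ∈ (if pvUsePfx cs then pvDropPfx cs else cs) := by
    split
    · next hu =>
      unfold pvUsePfx at hu
      split at hu
      · next c0 c1 t =>
        have h4 : '>' ∈ t := by
          rcases List.mem_cons.mp h2 with h5 | h5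
          · cases h5
          rcases List.mem_cons.mp h5 with rfl | h6
          · rcases Bool.or_eq_true_iff.mp hu with h7 | h7
            · exact absurd (of_decide_eq_true h7) (by decide)
            · exact absurd (of_decide_eq_true h7) (by decide)
          · exact h6
        unfold pvDropPfx
        simp only [List.drop_succ_cons, List.drop_zero]
        split
        · next d r =>
          have h5 : '>' ∈ d :: r := by
            rcases List.mem_cons.mp h4 with h6 | h6
            · cases h6
            · exact h6
          split
          · exact h5
          · exact h4
        · exact h4
      · cases hu
    · exact h2
  rw [pv_hexDigits_bad (by decide) (by decide) hds]

-- ---- int(·,16) on purely alphanumeric tokens ----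
lemma pv_alnum_ne {c : Char} (h : PySem.Chars.isalnum c = true) {d : Char}
    (hd : PySem.Chars.isalnum d = false) : c ≠ d := by
  intro rfl; rw [h] at hd; cases hd

lemma pv_alnum_not_space {c : Char} (h : PySem.Chars.isalnum c = true) :
    PySem.Int.isIntSpace c = false := by
  cases hsp : PySem.Int.isIntSpace c
  · rfl
  · exfalso
    unfold PySem.Int.isIntSpace at hsp
    rcases Bool.or_eq_true_iff.mp hsp with h5 | h5
    rcases Bool.or_eq_true_iff.mp h5 with h5 | h5
    rcases Bool.or_eq_true_iff.mp h5 with h5 | h5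
    rcases Bool.or_eq_true_iff.mp h5 with h5 | h5
    rcases Bool.or_eq_true_iff.mp h5 with h5 | h5
    all_goals (rw [of_decide_eq_true h5] at h; exact absurd h (by decide))

lemma pv_dropWhile_alnum {m : List Char} (h : ∀ c ∈ m, PySem.Chars.isalnum c = true) :
    List.dropWhile PySem.Int.isIntSpace m = m := by
  rw [List.dropWhile_eq_self_iff]
  intro hl
  rw [pv_alnum_not_space (h _ (List.getElem_mem hl))]
  exact Bool.false_ne_true

lemma pv_strip_alnum {m : List Char} (h : ∀ c ∈ m, PySem.Chars.isalnum c = true) :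
    pvStrip m = m := by
  unfold pvStrip
  rw [pv_dropWhile_alnum h, pv_dropWhile_alnum (fun c hc => h c (List.mem_reverse.mp hc)),
    List.reverse_reverse]

lemma pv_sign_alnum {m : List Char} (h : ∀ c ∈ m, PySem.Chars.isalnum c = true) :
    pvSign m = (false, m) := by
  unfold pvSign
  split
  · next r => exact absurd (h '-' (List.mem_cons_self ..)) (by decide)
  · next r => exact absurd (h '+' (List.mem_cons_self ..)) (by decide)
  · rfl

lemma pv_usePfx_iff (m : List Char) :
    pvUsePfx m = true ↔ (m.take 2 = ['0', 'x'] ∨ m.take 2 = ['0', 'X']) := by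
  match m with
  | [] => simp [pvUsePfx]
  | [c] =>
    simp only [pvUsePfx, List.take_succ_cons, List.take_nil]
    constructor
    · intro h; cases h
    · rintro (h | h) <;> cases h
  | c0 :: c1 :: t =>
    by_cases hc0 : c0 = '0'
    · subst hc0
      show (decide (c1 = 'x') || decide (c1 = 'X')) = true ↔ _
      simp only [List.take_succ_cons, List.take_zero, Bool.or_eq_true, decide_eq_true_eq,
        List.cons.injEq, and_true, true_and]
    · constructor
      · intro hu
        exfalso
        unfold pvUsePfx at hu
        split at hu
        · next heq =>
          injection heq with h1 _
          exact hc0 h1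
        · cases hu
      · rintro (h | h) <;>
          (simp only [List.take_succ_cons, List.take_zero, List.cons.injEq] at h;
           exact absurd h.1 hc0)

lemma pv_dropPfx_no_us {m : List Char} (h : ∀ c ∈ m.drop 2, c ≠ '_') :
    pvDropPfx m = m.drop 2 := by
  unfold pvDropPfx
  split
  · next d r heq =>
    exact absurd (heq ▸ List.mem_cons_self ..) (fun hm => h '_' hm rfl)
  · rfl

lemma pv_int16_alnum {run : List Char} (hall : ∀ c ∈ run, PySem.Chars.isalnum c = true) :
    (pvInt16? run).isSome = true ↔
      ((if run.take 2 = ['0', 'x'] ∨ run.take 2 = ['0', 'X'] then run.drop 2 else run) ≠ [] ∧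
       (if run.take 2 = ['0', 'x'] ∨ run.take 2 = ['0', 'X'] then run.drop 2 else run).all pvHexDigitOk = true) := by
  unfold pvInt16?
  rw [pv_strip_alnum hall, pv_sign_alnum hall]
  simp only
  have hds : (if pvUsePfx run then pvDropPfx run else run) =
      (if run.take 2 = ['0', 'x'] ∨ run.take 2 = ['0', 'X'] then run.drop 2 else run) := by
    by_cases hu : pvUsePfx run = true
    · rw [if_pos hu, if_pos ((pv_usePfx_iff run).mp hu),
        pv_dropPfx_no_us (fun c hc => pv_alnum_ne (hall c (List.mem_of_mem_drop hc)) (by decide))]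
    · rw [if_neg hu, if_neg (fun hh => hu ((pv_usePfx_iff run).mpr hh))]
  rw [hds]
  generalize hD : (if run.take 2 = ['0', 'x'] ∨ run.take 2 = ['0', 'X'] then run.drop 2 else run) = ds
  have hsub : ∀ c ∈ ds, PySem.Chars.isalnum c = true := by
    intro c hc
    rw [← hD] at hc
    split at hc
    · exact hall c (List.mem_of_mem_drop hc)
    · exact hall c hc
  constructor
  · intro hs
    constructor
    · rintro rfl; simp [pvHexDigits?] at hs
    · by_contra hbadall
      have hex : ∃ bad ∈ ds, pvHexDigitOk bad = false := by
        by_contra hno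
        push Not at hno
        exact hbadall (List.all_eq_true.mpr (fun x hx => by
          cases hpx : pvHexDigitOk x
          · exact absurd hpx (hno x hx)
          · rfl))
      rcases hex with ⟨bad, hmem, hbad⟩
      rw [pv_hexDigits_bad hbad (pv_alnum_ne (hsub bad hmem) (by decide)) hmem] at hs
      cases hs
  · rintro ⟨hne, hall2⟩
    cases hd : pvHexDigits? ds with
    | some n => simp
    | none =>
      exfalso
      cases ds with
      | nil => exact hne rfl
      | cons a t =>
        have := pv_hexGo_good (ds := a :: t) false 0
          (fun c hc => by have := List.all_eq_true.mp hall2 c hc; exact this) (Or.inl (by simp))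
        rw [show pvHexDigits? (a :: t) = pvHexGo (a :: t) false 0 from rfl] at hd
        rw [hd] at this
        cases this

-- ---- single-character find / slice / scan mechanics ----
lemma pv_single_prefix {d : Char} {ys : List Char} : [d] <+: ys ↔ ys.head? = some d := by
  cases ys with
  | nil => simp
  | cons c t =>
    constructor
    · intro h
      obtain ⟨l', heq, -⟩ := List.cons_prefix_iff.mp h
      rw [heq]
      rfl
    · intro h
      rw [List.head?_cons, Option.some.injEq] at h
      subst h
      exact List.cons_prefix_iff.mpr ⟨t, rfl, List.nil_prefix⟩

lemma pv_find_single_neg {l : List Char} {d : Char} :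
    PySem.Chars.find l [d] = -1 ↔ d ∉ l := by
  rw [PySem.Chars.find_eq_neg_one_iff, List.singleton_infix_iff]

lemma pv_find_single_cons (c : Char) (cs : List Char) (d : Char) :
    PySem.Chars.find (c :: cs) [d] =
      if c = d then 0
      else if PySem.Chars.find cs [d] = -1 then -1 else PySem.Chars.find cs [d] + 1 := by
  by_cases hc : c = d
  · subst hc
    rw [if_pos rfl]
    have hinf : 0 ≤ PySem.Chars.find (c :: cs) [c] :=
      (PySem.Chars.find_nonneg_iff _ _).mpr ((List.singleton_infix_iff _ _).mpr (List.mem_cons_self ..))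
    rcases PySem.Chars.find_spec hinf with ⟨hpre, hmin⟩
    by_cases h0 : (PySem.Chars.find (c :: cs) [c]).toNat = 0
    · omega
    · exact absurd ((pv_single_prefix (d := c) (ys := c :: cs)).mpr rfl) (by simpa using hmin 0 (by omega))
  · rw [if_neg hc]
    by_cases hn : PySem.Chars.find cs [d] = -1
    · rw [if_pos hn, pv_find_single_neg]
      intro hm
      rcases List.mem_cons.mp hm with rfl | hm2
      · exact hc rfl
      · exact pv_find_single_neg.mp hn hm2
    · rw [if_neg hn]
      have hf : 0 ≤ PySem.Chars.find cs [d] := by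
        have := PySem.Chars.neg_one_le_find cs [d]; omega
      have hF : 0 ≤ PySem.Chars.find (c :: cs) [d] := by
        refine (PySem.Chars.find_nonneg_iff _ _).mpr ((List.singleton_infix_iff _ _).mpr ?_)
        exact List.mem_cons_of_mem _
          ((List.singleton_infix_iff _ _).mp ((PySem.Chars.find_nonneg_iff _ _).mp hf))
      rcases PySem.Chars.find_spec hf with ⟨hpre, hmin⟩
      rcases PySem.Chars.find_spec hF with ⟨hPre, hMin⟩
      have hFne : (PySem.Chars.find (c :: cs) [d]).toNat ≠ 0 := by
        intro h0
        rw [h0] at hPre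
        simp only [List.drop_zero] at hPre
        have h2 := pv_single_prefix.mp hPre
        rw [List.head?_cons, Option.some.injEq] at h2
        exact hc h2
      have hle : (PySem.Chars.find (c :: cs) [d]).toNat ≤ (PySem.Chars.find cs [d]).toNat + 1 := by
        by_contra hgt
        exact hMin ((PySem.Chars.find cs [d]).toNat + 1) (by omega)
          (by rw [List.drop_succ_cons]; exact hpre)
      have hge : (PySem.Chars.find cs [d]).toNat + 1 ≤ (PySem.Chars.find (c :: cs) [d]).toNat := by
        by_contra hlt
        refine hmin ((PySem.Chars.find (c :: cs) [d]).toNat - 1) (by omega) ?_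
        have h3 := hPre
        rw [show (PySem.Chars.find (c :: cs) [d]).toNat =
          ((PySem.Chars.find (c :: cs) [d]).toNat - 1) + 1 from by omega,
          List.drop_succ_cons] at h3
        exact h3
      omega

lemma pv_find_shift (rest : List Char) (d : Char) (h1 : ('-' : Char) ≠ d) (h2 : ('>' : Char) ≠ d) :
    PySem.Chars.find ('-' :: '>' :: rest) [d] =
      if PySem.Chars.find rest [d] = -1 then -1 else PySem.Chars.find rest [d] + 2 := by
  rw [pv_find_single_cons, if_neg h1, pv_find_single_cons, if_neg h2]
  by_cases hn : PySem.Chars.find rest [d] = -1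
  · rw [if_pos hn, if_pos rfl, if_pos hn]
  · have hge : 0 ≤ PySem.Chars.find rest [d] := by
      have := PySem.Chars.neg_one_le_find rest [d]; omega
    rw [if_neg hn, if_neg (by omega : ¬(PySem.Chars.find rest [d] + 1 = -1)), if_neg hn]
    omega

lemma pv_slice_nat (l : List Char) (a b : Nat) :
    PySem.List.slice l (some (a : Int)) (some (b : Int)) = (l.drop a).take (b - a) := by
  unfold PySem.List.slice PySem.List.clampIdx
  dsimp only
  rw [if_neg (by omega : ¬((a : Int) < 0)), if_neg (by omega : ¬((b : Int) < 0)),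
    Int.toNat_natCast, Int.toNat_natCast]
  by_cases ha : a ≤ l.length
  · rw [min_eq_left ha]
    rcases Nat.le_total b l.length with hb | hb
    · rw [min_eq_left hb]
    · rw [min_eq_right hb,
        List.take_of_length_le (by rw [List.length_drop]),
        List.take_of_length_le (by rw [List.length_drop]; omega)]
  · rw [min_eq_right (by omega : l.length ≤ a), List.drop_length,
      List.drop_eq_nil_of_le (by omega)]
    simp

lemma pv_slice_none (l : List Char) (a : Nat) :
    PySem.List.slice l (some (a : Int)) none = l.drop a := by
  unfold PySem.List.slice PySem.List.clampIdx
  dsimp only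
  rw [if_neg (by omega : ¬((a : Int) < 0)), Int.toNat_natCast]
  by_cases ha : a ≤ l.length
  · rw [min_eq_left ha]
    exact List.take_of_length_le (by rw [List.length_drop])
  · rw [min_eq_right (by omega), List.drop_length, List.drop_eq_nil_of_le (by omega)]
    simp

lemma pv_slice_neg_one (l : List Char) (a : Nat) :
    PySem.List.slice l (some (a : Int)) (some (-1)) = (l.drop a).dropLast := by
  unfold PySem.List.slice PySem.List.clampIdx
  dsimp only
  rw [if_neg (by omega : ¬((a : Int) < 0)), if_pos (by omega : (-1 : Int) < 0),
    Int.toNat_natCast]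
  by_cases h0 : l.length = 0
  · rw [if_pos (by omega), List.eq_nil_of_length_eq_zero h0]
    simp
  · rw [if_neg (by omega)]
    rw [List.dropLast_eq_take, List.length_drop]
    by_cases ha : a ≤ l.length
    · rw [min_eq_left ha,
        show ((l.length : Int) + (-1 : Int)).toNat = l.length - 1 from by omega]
      congr 1
      omega
    · rw [min_eq_right (by omega), List.drop_length, List.drop_eq_nil_of_le (by omega)]
      simp

lemma pv_scanGo (l : List Char) :
    ∀ (fuel i : Nat), l.length ≤ i + fuel →
      pvScanAGo l fuel i = i + ((l.drop i).takeWhile PySem.Chars.isalnum).length := by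
  intro fuel
  induction fuel with
  | zero =>
    intro i h
    rw [List.drop_eq_nil_of_le (by omega)]
    simp [pvScanAGo]
  | succ n ih =>
    intro i h
    show (match l[i]? with
      | some c => if PySem.Chars.isalnum c then pvScanAGo l n (i + 1) else i
      | none => i) = _
    cases hg : l[i]? with
    | none =>
      dsimp only
      rw [List.drop_eq_nil_of_le (by
        rcases List.getElem?_eq_none_iff.mp hg with h2
        omega)]
      simp
    | some c =>
      dsimp only
      have hlt : i < l.length := by
        by_contra hge
        rw [List.getElem?_eq_none_iff.mpr (by omega)] at hg
        cases hg
      have hdrop : l.drop i = c :: l.drop (i + 1) := by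
        have := List.drop_eq_getElem_cons hlt
        rwa [(List.getElem?_eq_some_iff.mp hg).choose_spec] at this
      rw [hdrop]
      by_cases hal : PySem.Chars.isalnum c = true
      · rw [if_pos hal, ih (i + 1) (by omega), List.takeWhile_cons, if_pos hal]
        simp only [List.length_cons]
        omega
      · rw [if_neg hal, List.takeWhile_cons, if_neg hal]
        simp

lemma pv_scanA (l : List Char) (i : Nat) :
    pvScanA l i = i + ((l.drop i).takeWhile PySem.Chars.isalnum).length := by
  unfold pvScanA
  exact pv_scanGo l _ i (by omega)

lemma pv_take_prefix {t l : List Char} (h : t <+: l) : l.take t.length = t :=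
  (List.prefix_iff_eq_take.mp h).symm

-- the token A slices in the free branch is the alnum run after position j
lemma pv_token_slice (l : List Char) (j : Nat) :
    PySem.List.slice l (some (j : Int)) (some ((j + ((l.drop j).takeWhile PySem.Chars.isalnum).length : Nat) : Int)) =
      (l.drop j).takeWhile PySem.Chars.isalnum := by
  rw [pv_slice_nat]
  rw [show j + ((l.drop j).takeWhile PySem.Chars.isalnum).length - j =
    ((l.drop j).takeWhile PySem.Chars.isalnum).length from by omega]
  exact pv_take_prefix (List.takeWhile_prefix _)

lemma pv_arrow_decomp {l : List Char} {K : Nat}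
    (hk : PySem.Chars.find l ['-', '>'] = (K : Int)) :
    l.drop K = '-' :: '>' :: l.drop (K + 2) ∧ K ≤ l.length := by
  have h0 : 0 ≤ PySem.Chars.find l ['-', '>'] := by rw [hk]; omega
  have hlen := PySem.Chars.find_le_length l ['-', '>']
  rcases PySem.Chars.find_spec h0 with ⟨hpre, -⟩
  rw [hk, Int.toNat_natCast] at hpre
  obtain ⟨t, ht⟩ := hpre
  have h2 : t = l.drop (K + 2) := by
    have h3 := congrArg (List.drop 2) ht
    rw [List.drop_drop] at h3
    rwa [List.drop_left' (by rfl)] at h3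
  constructor
  · rw [← ht, h2]
    rfl
  · rw [hk] at hlen
    exact_mod_cast hlen

-- the value of A's findFrom(…, call_index) searches, in terms of the text after the arrow
lemma pv_findFrom_arrow {l : List Char} {K : Nat} (d : Char)
    (hd1 : ('-' : Char) ≠ d) (hd2 : ('>' : Char) ≠ d)
    (hdrop : l.drop K = '-' :: '>' :: l.drop (K + 2)) (hKlen : K ≤ l.length) :
    PySem.Chars.findFrom l [d] (K : Int) none =
      (if PySem.Chars.find (l.drop (K + 2)) [d] = -1 then -1
       else (K : Int) + (PySem.Chars.find (l.drop (K + 2)) [d] + 2)) := by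
  rw [PySem.Chars.findFrom_natCast l [d] K hKlen, hdrop, pv_find_shift _ _ hd1 hd2]
  by_cases hn : PySem.Chars.find (l.drop (K + 2)) [d] = -1
  · rw [if_pos hn, if_pos rfl, if_pos hn]
  · have hge : 0 ≤ PySem.Chars.find (l.drop (K + 2)) [d] := by
      have := PySem.Chars.neg_one_le_find (l.drop (K + 2)) [d]; omega
    rw [if_neg hn, if_neg (by omega), if_neg hn]

-- A's fallback when '=' is absent parses the whole line, which contains '>': always none
lemma pv_gt_mem {l : List Char} {K : Nat}
    (hdrop : l.drop K = '-' :: '>' :: l.drop (K + 2)) : '>' ∈ l :=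
  List.mem_of_mem_drop (l := l) (i := K) (hdrop ▸ List.mem_cons_of_mem _ (List.mem_cons_self ..))

-- the "= branch" of A, normalised to the text after the arrow
lemma pv_eq_branch {l : List Char} {K : Nat}
    (hdrop : l.drop K = '-' :: '>' :: l.drop (K + 2)) (hKlen : K ≤ l.length) :
    pvInt16? (PySem.List.slice l (some (PySem.Chars.findFrom l ['='] (K : Int) none + 1)) none) =
      (if PySem.Chars.find (l.drop (K + 2)) ['='] = -1 then none
       else pvInt16? ((l.drop (K + 2)).drop ((PySem.Chars.find (l.drop (K + 2)) ['=']).toNat + 1))) := by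
  rw [pv_findFrom_arrow '=' (by decide) (by decide) hdrop hKlen]
  by_cases hn : PySem.Chars.find (l.drop (K + 2)) ['='] = -1
  · rw [if_pos hn, if_pos hn]
    rw [show (-1 : Int) + 1 = ((0 : Nat) : Int) from by omega, pv_slice_none, List.drop_zero]
    exact pv_int16_gt (pv_gt_mem hdrop)
  · have hge : 0 ≤ PySem.Chars.find (l.drop (K + 2)) ['='] := by
      have := PySem.Chars.neg_one_le_find (l.drop (K + 2)) ['=']; omega
    rw [if_neg hn, if_neg hn]
    rw [show (K : Int) + (PySem.Chars.find (l.drop (K + 2)) ['='] + 2) + 1 =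
      ((K + (PySem.Chars.find (l.drop (K + 2)) ['=']).toNat + 3 : Nat) : Int) from by
        push_cast; omega]
    rw [pv_slice_none]
    congr 1
    rw [List.drop_drop]
    congr 1
    omega

-- A's free-branch token from position j is the alnum run there
lemma pv_free_token (l : List Char) (j : Nat) :
    PySem.List.slice l (some (j : Int))
        (some ((pvScanA l j : Nat) : Int)) = (l.drop j).takeWhile PySem.Chars.isalnum := by
  rw [pv_scanA]
  exact pv_token_slice l j

lemma pv_str_eq_free (x : String) : (x == "free") = true ↔ x.toList = ['f', 'r', 'e', 'e'] := by
  rw [beq_iff_eq, ← String.toList_inj, show "free".toList = ['f', 'r', 'e', 'e'] from by decide]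

lemma pv_find_free_last (c : Char) :
    PySem.Chars.find ['f', 'r', 'e', 'e', c] ['='] = if c = '=' then 4 else -1 := by
  rw [pv_find_single_cons, pv_find_single_cons, pv_find_single_cons, pv_find_single_cons,
    pv_find_single_cons, show PySem.Chars.find ([] : List Char) ['='] = -1 from by decide]
  rw [if_neg (by decide : ¬('f' : Char) = '='), if_neg (by decide : ¬('r' : Char) = '='),
    if_neg (by decide : ¬('e' : Char) = '='), if_neg (by decide : ¬('e' : Char) = '=')]
  by_cases hc : c = '='
  · norm_num [hc]
  · norm_num [hc]

-- the "= branch" value on an after-arrow text of the quirk shape 'free'+c is always none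
lemma pv_quirk_none {s : List Char} (hfree : s.dropLast = ['f', 'r', 'e', 'e']) :
    (if PySem.Chars.find s ['='] = -1 then none
     else pvInt16? (s.drop ((PySem.Chars.find s ['=']).toNat + 1))) = (none : Option Int) := by
  have hne : s ≠ [] := by intro h; rw [h] at hfree; cases hfree
  have hrest : s = ['f', 'r', 'e', 'e', s.getLast hne] := by
    conv_lhs => rw [← List.dropLast_concat_getLast hne]
    rw [hfree]
    rfl
  rw [hrest, pv_find_free_last]
  by_cases hc : s.getLast hne = '='
  · rw [if_pos hc, if_neg (by decide), show ((4 : Int)).toNat + 1 = 5 from by decide,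
      show List.drop 5 ['f', 'r', 'e', 'e', s.getLast hne] = [] from rfl]
    decide
  · rw [if_neg hc, if_pos rfl]

-- ---- B's state machine: projections and characterizations ----
-- proof-side projection machines for B's single pass
def pvEqStep : Bool × List Char → Char → Bool × List Char
  | (e, t), c => if e then (e, t ++ [c]) else if c = '=' then (true, t) else (e, t)

def pvParStep : Bool × List Char × Bool × List Char → Char → Bool × List Char × Bool × List Char
  | (p, n, ro, r), c =>
    if ro then (if PySem.Chars.isalnum c then (p, n, ro, r ++ [c]) else (p, n, false, r))
    else if p = false then (if c = '(' then (true, n, true, r) else (p, n ++ [c], ro, r))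
    else (p, n, ro, r)

-- the suffix after the first '->' occurrence, as B's seek phase detects it
def pvFindArr : Option Char → List Char → Option (List Char)
  | _, [] => none
  | p, c :: cs => if p = some '-' ∧ c = '>' then some cs else pvFindArr (some c) cs

lemma pv_step_arrow {st : PvSt} (h : st.arrow = true) (c : Char) : (pvStep st c).arrow = true := by
  obtain ⟨a, p, ps, n, ro, r, e, t⟩ := st
  cases a
  · cases h
  · simp only [pvStep]
    split_ifs <;> rfl

lemma pv_fold_arrow {st : PvSt} (h : st.arrow = true) (s : List Char) :
    (s.foldl pvStep st).arrow = true := by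
  induction s generalizing st with
  | nil => exact h
  | cons c cs ih => exact ih (pv_step_arrow h c)

lemma pv_step_eq_pair {st : PvSt} (h : st.arrow = true) (c : Char) :
    ((pvStep st c).eqSeen, (pvStep st c).tail) = pvEqStep (st.eqSeen, st.tail) c := by
  obtain ⟨a, p, ps, n, ro, r, e, t⟩ := st
  cases a
  · cases h
  · simp only [pvStep, pvEqStep]
    split_ifs <;> simp_all

lemma pv_step_par {st : PvSt} (h : st.arrow = true) (c : Char) :
    ((pvStep st c).parenSeen, (pvStep st c).name, (pvStep st c).runOpen, (pvStep st c).run) =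
      pvParStep (st.parenSeen, st.name, st.runOpen, st.run) c := by
  obtain ⟨a, p, ps, n, ro, r, e, t⟩ := st
  cases a
  · cases h
  · simp only [pvStep, pvParStep]
    split_ifs <;> simp_all

lemma pv_fold_eq_pair (s : List Char) :
    ∀ (st : PvSt), st.arrow = true →
      (((s.foldl pvStep st).eqSeen, (s.foldl pvStep st).tail)) = s.foldl pvEqStep (st.eqSeen, st.tail) := by
  induction s with
  | nil => intro st h; rfl
  | cons c cs ih =>
    intro st h
    rw [List.foldl_cons, List.foldl_cons, ih _ (pv_step_arrow h c), pv_step_eq_pair h c]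

lemma pv_fold_par (s : List Char) :
    ∀ (st : PvSt), st.arrow = true →
      ((s.foldl pvStep st).parenSeen, (s.foldl pvStep st).name, (s.foldl pvStep st).runOpen, (s.foldl pvStep st).run) =
        s.foldl pvParStep (st.parenSeen, st.name, st.runOpen, st.run) := by
  induction s with
  | nil => intro st h; rfl
  | cons c cs ih =>
    intro st h
    rw [List.foldl_cons, List.foldl_cons, ih _ (pv_step_arrow h c), pv_step_par h c]

-- eq machine: once '=' is seen everything is appended
lemma pv_eqm_true (s : List Char) : ∀ (t : List Char), s.foldl pvEqStep (true, t) = (true, t ++ s) := by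
  induction s with
  | nil => intro t; simp
  | cons c cs ih =>
    intro t
    rw [List.foldl_cons, show pvEqStep (true, t) c = (true, t ++ [c]) from rfl, ih]
    simp

-- eq machine from the unseen state: first '=' and the text after it
lemma pv_eqm (s : List Char) : ∀ (t : List Char),
    s.foldl pvEqStep (false, t) =
      if PySem.Chars.find s ['='] = -1 then (false, t)
      else (true, t ++ s.drop ((PySem.Chars.find s ['=']).toNat + 1)) := by
  induction s with
  | nil => intro t; rw [if_pos (by decide)]; rfl
  | cons c cs ih =>
    intro t
    rw [List.foldl_cons, pv_find_single_cons]
    by_cases hc : c = '='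
    · rw [if_pos hc, if_neg (by decide), show ((0 : Int)).toNat + 1 = 1 from rfl,
        List.drop_succ_cons, List.drop_zero,
        show pvEqStep (false, t) c = (true, t) from by simp [pvEqStep, hc], pv_eqm_true]
    · rw [if_neg hc, show pvEqStep (false, t) c = (false, t) from by simp [pvEqStep, hc], ih]
      by_cases hn : PySem.Chars.find cs ['='] = -1
      · rw [if_pos hn, if_pos hn, if_pos rfl]
      · have hge : 0 ≤ PySem.Chars.find cs ['='] := by
          have := PySem.Chars.neg_one_le_find cs ['=']; omega
        rw [if_neg hn, if_neg (by omega), if_neg hn,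
          show (PySem.Chars.find cs ['='] + 1).toNat + 1 = ((PySem.Chars.find cs ['=']).toNat + 1) + 1 from by omega,
          List.drop_succ_cons]

-- par machine: after the run has closed nothing changes
lemma pv_parm_closed (s : List Char) (n r : List Char) :
    s.foldl pvParStep (true, n, false, r) = (true, n, false, r) := by
  induction s with
  | nil => rfl
  | cons c cs ih => rw [List.foldl_cons, show pvParStep (true, n, false, r) c = (true, n, false, r) from rfl, ih]

-- par machine with the run open: collects exactly the alphanumeric prefix
lemma pv_parm_open (s : List Char) : ∀ (n r : List Char),
    ∃ b, s.foldl pvParStep (true, n, true, r) = (true, n, b, r ++ s.takeWhile PySem.Chars.isalnum) := by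
  induction s with
  | nil => intro n r; exact ⟨true, by simp⟩
  | cons c cs ih =>
    intro n r
    rw [List.foldl_cons, List.takeWhile_cons]
    by_cases hal : PySem.Chars.isalnum c = true
    · rw [if_pos hal, show pvParStep (true, n, true, r) c = (true, n, true, r ++ [c]) from by
        simp [pvParStep, hal]]
      obtain ⟨b, hb⟩ := ih n (r ++ [c])
      exact ⟨b, by rw [hb]; simp⟩
    · rw [if_neg hal, show pvParStep (true, n, true, r) c = (true, n, false, r) from by
        simp [pvParStep, hal]]
      exact ⟨false, by rw [pv_parm_closed]; simp⟩

-- par machine before '(' with no '(' coming: everything goes to the name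
lemma pv_parm_seek_none {s : List Char} (h : '(' ∉ s) : ∀ (n r : List Char),
    s.foldl pvParStep (false, n, false, r) = (false, n ++ s, false, r) := by
  induction s with
  | nil => intro n r; simp
  | cons c cs ih =>
    intro n r
    have hc : c ≠ '(' := fun hh => h (hh ▸ List.mem_cons_self ..)
    rw [List.foldl_cons, show pvParStep (false, n, false, r) c = (false, n ++ [c], false, r) from by
      simp [pvParStep, hc], ih (fun hm => h (List.mem_cons_of_mem _ hm))]
    simp

-- par machine before '(' with '(' at position F: name = text before it, run = alnum run after it
lemma pv_parm_seek_found (s : List Char) : ∀ (n r : List Char) (F : Nat),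
    PySem.Chars.find s ['('] = (F : Int) →
    ∃ b, s.foldl pvParStep (false, n, false, r) =
      (true, n ++ s.take F, b, r ++ (s.drop (F + 1)).takeWhile PySem.Chars.isalnum) := by
  induction s with
  | nil =>
    intro n r F hF
    rw [show PySem.Chars.find ([] : List Char) ['('] = -1 from by decide] at hF
    omega
  | cons c cs ih =>
    intro n r F hF
    rw [pv_find_single_cons] at hF
    by_cases hc : c = '('
    · rw [if_pos hc] at hF
      have hF0 : F = 0 := by omega
      subst hF0
      rw [List.foldl_cons, show pvParStep (false, n, false, r) c = (true, n, true, r) from by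
        simp [pvParStep, hc], List.take_zero, List.drop_succ_cons, List.drop_zero]
      obtain ⟨b, hb⟩ := pv_parm_open cs n r
      exact ⟨b, by rw [hb]; simp⟩
    · rw [if_neg hc] at hF
      by_cases hn : PySem.Chars.find cs ['('] = -1
      · rw [if_pos hn] at hF; omega
      · rw [if_neg hn] at hF
        have hge : 0 ≤ PySem.Chars.find cs ['('] := by
          have := PySem.Chars.neg_one_le_find cs ['(']; omega
        have hF' : PySem.Chars.find cs ['('] = ((F - 1 : Nat) : Int) := by omega
        have hFpos : 1 ≤ F := by omega
        rw [List.foldl_cons, show pvParStep (false, n, false, r) c = (false, n ++ [c], false, r) from by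
          simp [pvParStep, hc]]
        obtain ⟨b, hb⟩ := ih (n ++ [c]) r (F - 1) hF'
        refine ⟨b, ?_⟩
        rw [hb, show F = (F - 1) + 1 from by omega, List.take_succ_cons, List.drop_succ_cons]
        simp

-- one not-yet-arrowed step of B's loop
lemma pv_step_notarrow {st : PvSt} (h : st.arrow = false) (c : Char) :
    pvStep st c = if st.prev = some '-' ∧ c = '>' then { st with arrow := true, prev := some c }
                  else { st with prev := some c } := by
  obtain ⟨a, p, ps, n, ro, r, e, t⟩ := st
  cases a
  · simp only [pvStep]
    split_ifs <;> simp_all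
  · cases h

-- seek phase: if no '->' occurrence (from context p) the arrow flag stays down
lemma pv_seek_none (l : List Char) :
    ∀ (st : PvSt), st.arrow = false → pvFindArr st.prev l = none →
      (l.foldl pvStep st).arrow = false := by
  induction l with
  | nil => intro st h _; exact h
  | cons c cs ih =>
    intro st h hfa
    rw [show pvFindArr st.prev (c :: cs) =
      (if st.prev = some '-' ∧ c = '>' then some cs else pvFindArr (some c) cs) from rfl] at hfa
    by_cases htr : st.prev = some '-' ∧ c = '>'
    · rw [if_pos htr] at hfa; cases hfa
    · rw [if_neg htr] at hfa
      rw [List.foldl_cons, pv_step_notarrow h c, if_neg htr]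
      exact ih _ h hfa

-- seek phase: the fold after the arrow fires is B's after-arrow phase over the suffix
lemma pv_seek_some (l : List Char) :
    ∀ (st : PvSt) (rest : List Char), st.arrow = false → pvFindArr st.prev l = some rest →
      ∃ p, l.foldl pvStep st = rest.foldl pvStep { st with arrow := true, prev := p } := by
  induction l with
  | nil => intro st rest _ hfa; cases hfa
  | cons c cs ih =>
    intro st rest h hfa
    rw [show pvFindArr st.prev (c :: cs) =
      (if st.prev = some '-' ∧ c = '>' then some cs else pvFindArr (some c) cs) from rfl] at hfa
    by_cases htr : st.prev = some '-' ∧ c = '>'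
    · rw [if_pos htr, Option.some.injEq] at hfa
      subst hfa
      refine ⟨some c, ?_⟩
      rw [List.foldl_cons, pv_step_notarrow h c, if_pos htr]
    · rw [if_neg htr] at hfa
      rw [List.foldl_cons, pv_step_notarrow h c, if_neg htr]
      obtain ⟨p, hp⟩ := ih { st with prev := some c } rest h hfa
      exact ⟨p, hp⟩

-- two-character find, one step at a time
lemma pv_arrow_prefix {ys : List Char} : ['-', '>'] <+: ys ↔ ∃ t, ys = '-' :: '>' :: t := by
  constructor
  · rintro ⟨t, rfl⟩; exact ⟨t, rfl⟩
  · rintro ⟨t, rfl⟩; exact ⟨t, rfl⟩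

lemma pv_find_arrow_cons (c : Char) (cs : List Char) :
    PySem.Chars.find (c :: cs) ['-', '>'] =
      if ['-', '>'] <+: (c :: cs) then 0
      else if PySem.Chars.find cs ['-', '>'] = -1 then -1 else PySem.Chars.find cs ['-', '>'] + 1 := by
  by_cases hp : ['-', '>'] <+: (c :: cs)
  · rw [if_pos hp]
    have hinf : 0 ≤ PySem.Chars.find (c :: cs) ['-', '>'] :=
      (PySem.Chars.find_nonneg_iff _ _).mpr hp.isInfix
    rcases PySem.Chars.find_spec hinf with ⟨hpre, hmin⟩
    by_cases h0 : (PySem.Chars.find (c :: cs) ['-', '>']).toNat = 0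
    · omega
    · exact absurd hp (by simpa using hmin 0 (by omega))
  · rw [if_neg hp]
    by_cases hn : PySem.Chars.find cs ['-', '>'] = -1
    · rw [if_pos hn, PySem.Chars.find_eq_neg_one_iff]
      intro hinf
      rcases List.infix_cons_iff.mp hinf with h1 | h1
      · exact hp h1
      · exact (PySem.Chars.find_eq_neg_one_iff _ _).mp hn h1
    · rw [if_neg hn]
      have hf : 0 ≤ PySem.Chars.find cs ['-', '>'] := by
        have := PySem.Chars.neg_one_le_find cs ['-', '>']; omega
      have hF : 0 ≤ PySem.Chars.find (c :: cs) ['-', '>'] := by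
        refine (PySem.Chars.find_nonneg_iff _ _).mpr ?_
        exact List.infix_cons_iff.mpr (Or.inr ((PySem.Chars.find_nonneg_iff _ _).mp hf))
      rcases PySem.Chars.find_spec hf with ⟨hpre, hmin⟩
      rcases PySem.Chars.find_spec hF with ⟨hPre, hMin⟩
      have hFne : (PySem.Chars.find (c :: cs) ['-', '>']).toNat ≠ 0 := by
        intro h0
        rw [h0] at hPre
        simp only [List.drop_zero] at hPre
        exact hp hPre
      have hle : (PySem.Chars.find (c :: cs) ['-', '>']).toNat ≤ (PySem.Chars.find cs ['-', '>']).toNat + 1 := by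
        by_contra hgt
        exact hMin ((PySem.Chars.find cs ['-', '>']).toNat + 1) (by omega)
          (by rw [List.drop_succ_cons]; exact hpre)
      have hge : (PySem.Chars.find cs ['-', '>']).toNat + 1 ≤ (PySem.Chars.find (c :: cs) ['-', '>']).toNat := by
        by_contra hlt
        refine hmin ((PySem.Chars.find (c :: cs) ['-', '>']).toNat - 1) (by omega) ?_
        have h3 := hPre
        rw [show (PySem.Chars.find (c :: cs) ['-', '>']).toNat =
          ((PySem.Chars.find (c :: cs) ['-', '>']).toNat - 1) + 1 from by omega,
          List.drop_succ_cons] at h3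
        exact h3
      omega

-- pvFindArr from the empty context agrees with find on the pattern "->"
lemma pv_findArr_spec : ∀ (l : List Char),
    (PySem.Chars.find l ['-', '>'] = -1 → pvFindArr none l = none) ∧
    (∀ K : Nat, PySem.Chars.find l ['-', '>'] = (K : Int) → pvFindArr none l = some (l.drop (K + 2))) := by
  intro l
  induction l with
  | nil =>
    refine ⟨fun _ => rfl, fun K hK => ?_⟩
    rw [show PySem.Chars.find ([] : List Char) ['-', '>'] = -1 from by decide] at hK
    omega
  | cons c cs ih =>
    have hcons : pvFindArr none (c :: cs) = pvFindArr (some c) cs := by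
      simp [pvFindArr]
    cases cs with
    | nil =>
      refine ⟨fun _ => rfl, fun K hK => ?_⟩
      rw [pv_find_arrow_cons] at hK
      rw [if_neg (by rw [pv_arrow_prefix]; rintro ⟨t, ht⟩; cases ht), if_pos (by decide)] at hK
      omega
    | cons d ds =>
      have hstep : pvFindArr none (c :: d :: ds) =
          (if c = '-' ∧ d = '>' then some ds else pvFindArr none (d :: ds)) := by
        rw [hcons, show pvFindArr (some c) (d :: ds) =
          (if some c = some '-' ∧ d = '>' then some ds else pvFindArr (some d) ds) from rfl]
        by_cases htr : c = '-' ∧ d = '>'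
        · rw [if_pos ⟨by rw [htr.1], htr.2⟩, if_pos htr]
        · rw [if_neg (fun hh => htr ⟨Option.some.inj hh.1, hh.2⟩), if_neg htr]
          simp [pvFindArr]
      by_cases htr : c = '-' ∧ d = '>'
      · obtain ⟨rfl, rfl⟩ := htr
        have hpre : ['-', '>'] <+: ('-' :: '>' :: ds) := ⟨ds, rfl⟩
        constructor
        · intro hK
          rw [pv_find_arrow_cons, if_pos hpre] at hK
          cases hK
        · intro K hK
          rw [pv_find_arrow_cons, if_pos hpre] at hK
          have hK0 : K = 0 := by omega
          subst hK0
          rw [hstep, if_pos ⟨rfl, rfl⟩]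
          rfl
      · have hnp : ¬ (['-', '>'] <+: (c :: d :: ds)) := by
          rw [pv_arrow_prefix]
          rintro ⟨t, ht⟩
          injection ht with h1 h2
          injection h2 with h3 _
          exact htr ⟨h1, h3⟩
        constructor
        · intro hK
          rw [pv_find_arrow_cons, if_neg hnp] at hK
          rw [hstep, if_neg htr]
          by_cases hn : PySem.Chars.find (d :: ds) ['-', '>'] = -1
          · exact ih.1 hn
          · rw [if_neg hn] at hK
            have := PySem.Chars.neg_one_le_find (d :: ds) ['-', '>']
            omega
        · intro K hK
          rw [pv_find_arrow_cons, if_neg hnp] at hK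
          rw [hstep, if_neg htr]
          by_cases hn : PySem.Chars.find (d :: ds) ['-', '>'] = -1
          · rw [if_pos hn] at hK; omega
          · rw [if_neg hn] at hK
            have hge : 0 ≤ PySem.Chars.find (d :: ds) ['-', '>'] := by
              have := PySem.Chars.neg_one_le_find (d :: ds) ['-', '>']; omega
            have hK' : PySem.Chars.find (d :: ds) ['-', '>'] = ((K - 1 : Nat) : Int) := by omega
            rw [show K + 2 = (K - 1 + 2) + 1 from by omega, List.drop_succ_cons]
            exact ih.2 (K - 1) hK'

-- B's final answer, in the same normal form A reduces to
lemma pv_alt_char (line : String) :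
    get_heap_address_alt line =
      (match pvFindArr none line.toList with
       | none => none
       | some s =>
         if PySem.Chars.find s ['('] ≠ -1 ∧
             s.take (PySem.Chars.find s ['(']).toNat = ['f', 'r', 'e', 'e'] then
           pvInt16? ((s.drop ((PySem.Chars.find s ['(']).toNat + 1)).takeWhile PySem.Chars.isalnum)
         else if PySem.Chars.find s ['='] = -1 then none
         else pvInt16? (s.drop ((PySem.Chars.find s ['=']).toNat + 1))) := by
  unfold get_heap_address_alt
  cases hfa : pvFindArr none line.toList with
  | none =>
    have harr : (line.toList.foldl pvStep pvInit).arrow = false :=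
      pv_seek_none line.toList pvInit rfl hfa
    rw [if_pos harr]
  | some s =>
    obtain ⟨p, hp⟩ := pv_seek_some line.toList pvInit s rfl hfa
    rw [hp]
    set st0 : PvSt := { pvInit with arrow := true, prev := p } with hst0
    have h0 : st0.arrow = true := rfl
    have harr : (s.foldl pvStep st0).arrow = true := pv_fold_arrow h0 s
    rw [if_neg (by simp [harr])]
    dsimp only
    have hEq := pv_fold_eq_pair s st0 h0
    have hPar := pv_fold_par s st0 h0
    rw [show st0.eqSeen = false from rfl, show st0.tail = ([] : List Char) from rfl,
      pv_eqm s []] at hEq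
    rw [show st0.parenSeen = false from rfl, show st0.name = ([] : List Char) from rfl,
      show st0.runOpen = false from rfl, show st0.run = ([] : List Char) from rfl] at hPar
    by_cases hf : PySem.Chars.find s ['('] = -1
    · -- no '(' after the arrow: parenSeen is false
      rw [pv_parm_seek_none (pv_find_single_neg.mp hf) [] []] at hPar
      simp only [Prod.mk.injEq, List.nil_append] at hPar
      obtain ⟨hps, -, -, -⟩ := hPar
      have hA : ¬((s.foldl pvStep st0).parenSeen = true ∧ (s.foldl pvStep st0).name = ['f', 'r', 'e', 'e']) := by
        rw [hps]; rintro ⟨h1, -⟩; cases h1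
      have hB : ¬(PySem.Chars.find s ['('] ≠ -1 ∧
          s.take (PySem.Chars.find s ['(']).toNat = ['f', 'r', 'e', 'e']) := by
        rintro ⟨h1, -⟩; exact h1 hf
      rw [if_neg hA, if_neg hB]
      by_cases he : PySem.Chars.find s ['='] = -1
      · rw [if_pos he] at hEq
        simp only [Prod.mk.injEq] at hEq
        rw [if_pos he, if_pos hEq.1]
      · rw [if_neg he] at hEq
        simp only [Prod.mk.injEq, List.nil_append] at hEq
        rw [if_neg he, if_neg (by rw [hEq.1]; simp), hEq.2]
    · obtain ⟨F, hF⟩ : ∃ F : Nat, PySem.Chars.find s ['('] = (F : Int) :=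
        ⟨_, (Int.toNat_of_nonneg (by have := PySem.Chars.neg_one_le_find s ['(']; omega)).symm⟩
      obtain ⟨b, hb⟩ := pv_parm_seek_found s [] [] F hF
      rw [hb] at hPar
      simp only [Prod.mk.injEq, List.nil_append] at hPar
      obtain ⟨hps, hnm, -, hrn⟩ := hPar
      rw [hF, Int.toNat_natCast]
      by_cases hfree : s.take F = ['f', 'r', 'e', 'e']
      · rw [if_pos ⟨hps, by rw [hnm]; exact hfree⟩, if_pos ⟨by omega, hfree⟩, hrn]
      · have hA : ¬((s.foldl pvStep st0).parenSeen = true ∧ (s.foldl pvStep st0).name = ['f', 'r', 'e', 'e']) := by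
          rintro ⟨-, h2⟩; rw [hnm] at h2; exact hfree h2
        have hB : ¬((F : Int) ≠ -1 ∧ s.take F = ['f', 'r', 'e', 'e']) := by
          rintro ⟨-, h2⟩; exact hfree h2
        rw [if_neg hA, if_neg hB]
        by_cases he : PySem.Chars.find s ['='] = -1
        · rw [if_pos he] at hEq
          simp only [Prod.mk.injEq] at hEq
          rw [if_pos he, if_pos hEq.1]
        · rw [if_neg he] at hEq
          simp only [Prod.mk.injEq, List.nil_append] at hEq
          rw [if_neg he, if_neg (by rw [hEq.1]; simp), hEq.2]

-- A reduced to the shared normal form (outside the quirk the free-token case, inside it the leading run)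
lemma pv_A_reduce (line : String) {K : Nat}
    (hK : PySem.Chars.find line.toList ['-', '>'] = (K : Int)) :
    get_heap_address line =
      (let l := line.toList
       let s := l.drop (K + 2)
       if PySem.Chars.find s ['('] = -1 then
         (if s.dropLast = ['f', 'r', 'e', 'e'] then
            pvInt16? (l.takeWhile PySem.Chars.isalnum)
          else if PySem.Chars.find s ['='] = -1 then none
          else pvInt16? (s.drop ((PySem.Chars.find s ['=']).toNat + 1)))
       else
         (if s.take (PySem.Chars.find s ['(']).toNat = ['f', 'r', 'e', 'e'] then
            pvInt16? ((s.drop ((PySem.Chars.find s ['(']).toNat + 1)).takeWhile PySem.Chars.isalnum)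
          else if PySem.Chars.find s ['='] = -1 then none
          else pvInt16? (s.drop ((PySem.Chars.find s ['=']).toNat + 1)))) := by
  obtain ⟨hdrop, hKlen⟩ := pv_arrow_decomp hK
  unfold get_heap_address
  simp only [PySem.Str.find_eq, PySem.Str.findFrom_eq,
    show "->".toList = ['-', '>'] from by decide, show "(".toList = ['('] from by decide,
    show "=".toList = ['='] from by decide]
  rw [hK]
  rw [if_neg (by intro h; have := beq_iff_eq.mp h; omega)]
  rw [pv_findFrom_arrow '(' (by decide) (by decide) hdrop hKlen]
  by_cases hf : PySem.Chars.find (line.toList.drop (K + 2)) ['('] = -1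
  · rw [if_pos hf]
    rw [if_pos hf]
    have hsl : (PySem.Str.slice line (some ((K : Int) + 2)) (some (-1))).toList =
        (line.toList.drop (K + 2)).dropLast := by
      rw [PySem.Str.toList_slice, PySem.Chars.slice_eq_listSlice,
        show (K : Int) + 2 = ((K + 2 : Nat) : Int) from by push_cast; ring,
        pv_slice_neg_one]
    by_cases hfree : (line.toList.drop (K + 2)).dropLast = ['f', 'r', 'e', 'e']
    · rw [if_pos ((pv_str_eq_free _).mpr (by rw [hsl]; exact hfree)), if_pos hfree]
      rw [show (-1 : Int) + 1 = ((0 : Nat) : Int) from by omega, Int.toNat_natCast,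
        PySem.Str.toList_slice, PySem.Chars.slice_eq_listSlice]
      simp only [pv_free_token, List.drop_zero]
    · rw [if_neg (fun h => hfree (by rw [← hsl]; exact (pv_str_eq_free _).mp h)), if_neg hfree]
      rw [PySem.Str.toList_slice, PySem.Chars.slice_eq_listSlice]
      exact pv_eq_branch hdrop hKlen
  · obtain ⟨F, hF⟩ : ∃ F : Nat, PySem.Chars.find (line.toList.drop (K + 2)) ['('] = (F : Int) :=
      ⟨_, (Int.toNat_of_nonneg (by
        have := PySem.Chars.neg_one_le_find (line.toList.drop (K + 2)) ['(']; omega)).symm⟩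
    rw [if_neg hf]
    rw [if_neg hf]
    rw [hF, Int.toNat_natCast]
    have hsl : (PySem.Str.slice line (some ((K : Int) + 2))
        (some ((K : Int) + ((F : Int) + 2)))).toList = (line.toList.drop (K + 2)).take F := by
      rw [PySem.Str.toList_slice, PySem.Chars.slice_eq_listSlice,
        show (K : Int) + 2 = ((K + 2 : Nat) : Int) from by push_cast; ring,
        show (K : Int) + ((F : Int) + 2) = ((K + 2 + F : Nat) : Int) from by push_cast; ring,
        pv_slice_nat, show K + 2 + F - (K + 2) = F from by omega]
    by_cases hname : (line.toList.drop (K + 2)).take F = ['f', 'r', 'e', 'e']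
    · rw [if_pos ((pv_str_eq_free _).mpr (by rw [hsl]; exact hname)), if_pos hname]
      rw [show (K : Int) + ((F : Int) + 2) + 1 = ((K + 2 + (F + 1) : Nat) : Int) from by
        push_cast; ring, Int.toNat_natCast, PySem.Str.toList_slice,
        PySem.Chars.slice_eq_listSlice, pv_free_token]
      rw [List.drop_drop]
    · rw [if_neg (fun h => hname (by rw [← hsl]; exact (pv_str_eq_free _).mp h)), if_neg hname]
      rw [PySem.Str.toList_slice, PySem.Chars.slice_eq_listSlice]
      exact pv_eq_branch hdrop hKlen

-- ===== VERDICT (by name: the statement is the Claim_ definition above) =====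
theorem get_heap_address_spec : Claim_unchanged_get_heap_address := by
  intro line hdom hD
  show get_heap_address line = get_heap_address_alt line
  by_cases hk : PySem.Chars.find line.toList ['-', '>'] = -1
  · rw [pv_alt_char, (pv_findArr_spec line.toList).1 hk]
    unfold get_heap_address
    simp only [PySem.Str.find_eq, show "->".toList = ['-', '>'] from by decide]
    rw [if_pos (by rw [hk]; decide)]
  · obtain ⟨K, hK⟩ : ∃ K : Nat, PySem.Chars.find line.toList ['-', '>'] = (K : Int) :=
      ⟨_, (Int.toNat_of_nonneg (by
        have := PySem.Chars.neg_one_le_find line.toList ['-', '>']; omega)).symm⟩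
    rw [pv_alt_char, (pv_findArr_spec line.toList).2 K hK, pv_A_reduce line hK]
    simp only
    by_cases hf : PySem.Chars.find (line.toList.drop (K + 2)) ['('] = -1
    · have hBneg : ¬(PySem.Chars.find (line.toList.drop (K + 2)) ['('] ≠ -1 ∧
          (line.toList.drop (K + 2)).take
            (PySem.Chars.find (line.toList.drop (K + 2)) ['(']).toNat = ['f', 'r', 'e', 'e']) := by
        rintro ⟨h1, -⟩; exact h1 hf
      rw [if_pos hf, if_neg hBneg]
      by_cases hfree : (line.toList.drop (K + 2)).dropLast = ['f', 'r', 'e', 'e']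
      · rw [if_pos hfree, pv_quirk_none hfree]
        have hvalid : ¬ (let run := line.toList.takeWhile PySem.Chars.isalnum
            let ds := if run.take 2 = ['0', 'x'] ∨ run.take 2 = ['0', 'X']
              then run.drop 2 else run
            ds ≠ [] ∧ ds.all (fun c => (PySem.Int.digitVal? c).getD 16 < 16) = true) := by
          intro hv
          exact hD ⟨by rw [hK]; intro h; omega,
            by rw [hK, Int.toNat_natCast]; unfold PySem.Chars.isIn; rw [hf]; rfl,
            by rw [hK, Int.toNat_natCast]; exact hfree, hv⟩
        exact Option.not_isSome_iff_eq_none.mp (fun hs => hvalid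
          ((pv_int16_alnum (fun c hc => List.mem_takeWhile_imp hc)).mp hs))
      · rw [if_neg hfree]
    · rw [if_neg hf]
      by_cases hname : (line.toList.drop (K + 2)).take
          (PySem.Chars.find (line.toList.drop (K + 2)) ['(']).toNat = ['f', 'r', 'e', 'e']
      · rw [if_pos hname, if_pos ⟨hf, hname⟩]
      · have hB2 : ¬(PySem.Chars.find (line.toList.drop (K + 2)) ['('] ≠ -1 ∧
            (line.toList.drop (K + 2)).take
              (PySem.Chars.find (line.toList.drop (K + 2)) ['(']).toNat = ['f', 'r', 'e', 'e']) :=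
          fun h => hname h.2
        rw [if_neg hname, if_neg hB2]

theorem get_heap_address_changed : Claim_changed_get_heap_address := by
  unfold Claim_changed_get_heap_address; decide

theorem get_heap_address_tight : Claim_exact_get_heap_address := by
  intro line hdom hD
  obtain ⟨hk, hpar, hfree, hvalid⟩ := hD
  obtain ⟨K, hK⟩ : ∃ K : Nat, PySem.Chars.find line.toList ['-', '>'] = (K : Int) :=
    ⟨_, (Int.toNat_of_nonneg (by
      have := PySem.Chars.neg_one_le_find line.toList ['-', '>']; omega)).symm⟩
  rw [hK, Int.toNat_natCast] at hpar hfree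
  have hf : PySem.Chars.find (line.toList.drop (K + 2)) ['('] = -1 := by
    rw [PySem.Chars.find_eq_neg_one_iff]
    exact (PySem.Chars.isIn_eq_false_iff _ _).mp hpar
  rw [pv_A_reduce line hK, pv_alt_char, (pv_findArr_spec line.toList).2 K hK]
  simp only
  have hBneg : ¬(PySem.Chars.find (line.toList.drop (K + 2)) ['('] ≠ -1 ∧
      (line.toList.drop (K + 2)).take
        (PySem.Chars.find (line.toList.drop (K + 2)) ['(']).toNat = ['f', 'r', 'e', 'e']) := by
    rintro ⟨h1, -⟩; exact h1 hf
  rw [if_pos hf, if_pos hfree, if_neg hBneg, pv_quirk_none hfree]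
  have hs : (pvInt16? (line.toList.takeWhile PySem.Chars.isalnum)).isSome = true :=
    (pv_int16_alnum (fun c hc => List.mem_takeWhile_imp hc)).mpr hvalid
  intro hcon
  rw [hcon] at hs
  cases hs
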